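-- pv_equiv track=rewrite | github.com/mgellert/advent-of-code-2021-python | day20/trench_map.py | _enhance_pixel
-- ===== SOURCE A (Python) =====
-- DARK_PX = '.'
--
-- LIGHT_PX = '#'
--
-- def _enhance_pixel(image, i, j, algorithm, outside_px):
--     width = len(image[0])
--     height = len(image)
--
--     window = [[outside_px] * 3 for i in range(3)]
--     for k in range(-1, 2):
--         for l in range(-1, 2):
--             dx = i + k
--             dy = j + l
--
--             if (0 <= dx < width) and (0 <= dy < height):
--                 window[k + 1][l + 1] = image[dx][dy]
--
--     binary = ''.join(''.join(line) for line in window).replace(DARK_PX, '0').replace(LIGHT_PX, '1')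
--     idx = int(binary, 2)
--     return algorithm[idx]
-- ===== SOURCE B (Python) =====
-- DARK_PX = '.'
--
-- LIGHT_PX = '#'
--
-- def _enhance_pixel(image, i, j, algorithm, outside_px):
--     width = len(image[0])
--     height = len(image)
--
--     idx = 0
--     for k in range(-1, 2):
--         for l in range(-1, 2):
--             dx = i + k
--             dy = j + l
--             px = image[dx][dy] if (0 <= dx < width) and (0 <= dy < height) else outside_px
--             idx = idx * 2 + (1 if px == LIGHT_PX else 0)
--
--     return algorithm[idx]
-- ===== Notes on version B (the rewrite author's own statement) =====
-- stated objective: simpler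
-- what changed: B accumulates the 9-bit index arithmetically (idx = idx*2 + bit) in one pass over the same k,l loop, instead of building a 3x3 window matrix, joining it to a string, doing two replaces and parsing it with int(...,2).
-- outside the precondition, e.g. on _enhance_pixel(['1'], 0, 0, '................#', '.'): A returns '#', B returns '.'; on _enhance_pixel(['#'], 0, 0, '.#', ''): A returns '#', B raises IndexError
import Mathlib
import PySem

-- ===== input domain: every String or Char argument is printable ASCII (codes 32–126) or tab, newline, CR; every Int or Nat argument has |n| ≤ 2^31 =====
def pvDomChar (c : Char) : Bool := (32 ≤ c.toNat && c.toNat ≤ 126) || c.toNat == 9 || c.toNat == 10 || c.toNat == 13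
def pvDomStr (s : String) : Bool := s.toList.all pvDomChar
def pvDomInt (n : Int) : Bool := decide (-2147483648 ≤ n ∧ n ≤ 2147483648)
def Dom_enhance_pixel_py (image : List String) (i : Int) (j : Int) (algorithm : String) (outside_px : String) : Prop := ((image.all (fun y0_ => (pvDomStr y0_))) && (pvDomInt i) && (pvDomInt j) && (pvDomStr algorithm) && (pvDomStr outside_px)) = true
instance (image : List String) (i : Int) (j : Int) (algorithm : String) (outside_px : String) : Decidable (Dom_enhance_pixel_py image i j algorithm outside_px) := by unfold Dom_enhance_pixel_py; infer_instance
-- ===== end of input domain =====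

-- B computes the 9-bit enhancement index arithmetically (idx = idx*2 + bit) in one pass over the
-- same k,l loop, instead of building a 3x3 window matrix, joining, replacing and int(...,2)-parsing.


-- Shared transliterations of the Python lines both A and B contain verbatim:
-- 'len(image[0])' (the none-branch is unreachable under Pre_: Python raises IndexError on image == [])
def pvW (image : List String) : Int :=
  match PySem.List.pyGet? image 0 with
  | some s => PySem.Str.len s
  | none => 0
-- 'len(image)'
def pvH (image : List String) : Int := PySem.List.len image
-- 'image[dx][dy]' (the none-branches are unreachable under Pre_: Python raises IndexError there)
def pvPix (image : List String) (outside_px : String) (dx dy : Int) : String :=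
  match PySem.List.pyGet? image dx with
  | some row =>
      match PySem.Str.pyGet? row dy with
      | some c => String.mk [c]
      | none => outside_px
  | none => outside_px
-- 'return algorithm[idx]' (the none-branch is unreachable under Pre_: Python raises IndexError there)
def pvLookup (algorithm : String) (idx : Int) : String :=
  match PySem.Str.pyGet? algorithm idx with
  | some c => String.mk [c]
  | none => ""

-- ===== PORT A =====
def enhance_pixel_py (image : List String) (i : Int) (j : Int) (algorithm : String) (outside_px : String) : String :=
  let width := pvW image
  let height := pvH image
  let window : List (List String) := List.replicate 3 (List.replicate 3 outside_px)
  let window := (PySem.List.pyRange (-1) 2 1).foldl (fun w k =>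
    (PySem.List.pyRange (-1) 2 1).foldl (fun w l =>
      let dx := i + k
      let dy := j + l
      if (0 ≤ dx ∧ dx < width) ∧ (0 ≤ dy ∧ dy < height) then
        -- window[k+1][l+1] = image[dx][dy]  (k+1, l+1 ∈ {0,1,2}, so .toNat is exact)
        w.set (k + 1).toNat ((w.getD (k + 1).toNat []).set (l + 1).toNat (pvPix image outside_px dx dy))
      else w) w) window
  let binary := PySem.Str.replace (PySem.Str.replace
      (PySem.Str.join "" (window.map (fun line => PySem.Str.join "" line))) "." "0") "#" "1"
  -- int(binary, 2); .getD 0 is unreachable under Pre_ (Python raises ValueError there)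
  let idx := (PySem.Int.ofStrBase? binary 2).getD 0
  pvLookup algorithm idx

-- ===== PORT B =====
def enhance_pixel_py_alt (image : List String) (i : Int) (j : Int) (algorithm : String) (outside_px : String) : String :=
  let width := pvW image
  let height := pvH image
  let idx := (PySem.List.pyRange (-1) 2 1).foldl (fun idx k =>
    (PySem.List.pyRange (-1) 2 1).foldl (fun idx l =>
      let dx := i + k
      let dy := j + l
      let px := if (0 ≤ dx ∧ dx < width) ∧ (0 ≤ dy ∧ dy < height) then pvPix image outside_px dx dy else outside_px
      idx * 2 + (if px = "#" then (1 : Int) else 0)) idx) 0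
  pvLookup algorithm idx

-- ===== PRECONDITION & SPEC =====
-- The pixel value Python reads at (dx, dy): the image character inside the bounds test, outside_px outside.
def pvG (image : List String) (outside_px : String) (w h dx dy : Int) : String :=
  if (0 ≤ dx ∧ dx < w) ∧ (0 ≤ dy ∧ dy < h) then pvPix image outside_px dx dy else outside_px
def pvB (s : String) : Int := if s = "#" then 1 else 0
-- A cell is OK when the in-bounds lookup really succeeds (else Python raises IndexError on a ragged
-- image or when width > height) and the resulting pixel is '.', '#' or '0' ('0' passes through
-- int(...,2) as a zero bit, which B's px == LIGHT_PX test also gives). Other cells are excluded: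
-- A either raises ValueError in int(...,2) or, for strings int() happens to accept (e.g. a '1'
-- pixel or a multi-character outside_px of binary digits), returns an accidental value.
def pvOk (image : List String) (outside_px : String) (w h dx dy : Int) : Bool :=
  (!(decide ((0 ≤ dx ∧ dx < w) ∧ (0 ≤ dy ∧ dy < h))) ||
    ((PySem.List.pyGet? image dx).bind (fun row => PySem.Str.pyGet? row dy)).isSome) &&
  (pvG image outside_px w h dx dy == "." || pvG image outside_px w h dx dy == "#" ||
   pvG image outside_px w h dx dy == "0")

-- Pre_ excludes: the empty image and in-bounds index failures (A raises IndexError), an index past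
-- the end of algorithm (A raises IndexError), and window cells other than '.', '#', '0' — on those A
-- either raises ValueError in int(...,2) or returns an accidental value of its digit parse that B
-- does not reproduce (see the cites in the claim).
def Pre_enhance_pixel_py (image : List String) (i : Int) (j : Int) (algorithm : String) (outside_px : String) : Prop :=
  image ≠ [] ∧
  (pvOk image outside_px (pvW image) (pvH image) (i + -1) (j + -1) &&
   pvOk image outside_px (pvW image) (pvH image) (i + -1) (j + 0) &&
   pvOk image outside_px (pvW image) (pvH image) (i + -1) (j + 1) &&
   pvOk image outside_px (pvW image) (pvH image) (i + 0) (j + -1) &&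
   pvOk image outside_px (pvW image) (pvH image) (i + 0) (j + 0) &&
   pvOk image outside_px (pvW image) (pvH image) (i + 0) (j + 1) &&
   pvOk image outside_px (pvW image) (pvH image) (i + 1) (j + -1) &&
   pvOk image outside_px (pvW image) (pvH image) (i + 1) (j + 0) &&
   pvOk image outside_px (pvW image) (pvH image) (i + 1) (j + 1)) = true ∧
  256 * pvB (pvG image outside_px (pvW image) (pvH image) (i + -1) (j + -1)) +
  128 * pvB (pvG image outside_px (pvW image) (pvH image) (i + -1) (j + 0)) +
   64 * pvB (pvG image outside_px (pvW image) (pvH image) (i + -1) (j + 1)) +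
   32 * pvB (pvG image outside_px (pvW image) (pvH image) (i + 0) (j + -1)) +
   16 * pvB (pvG image outside_px (pvW image) (pvH image) (i + 0) (j + 0)) +
    8 * pvB (pvG image outside_px (pvW image) (pvH image) (i + 0) (j + 1)) +
    4 * pvB (pvG image outside_px (pvW image) (pvH image) (i + 1) (j + -1)) +
    2 * pvB (pvG image outside_px (pvW image) (pvH image) (i + 1) (j + 0)) +
        pvB (pvG image outside_px (pvW image) (pvH image) (i + 1) (j + 1)) < PySem.Str.len algorithm

instance (image : List String) (i : Int) (j : Int) (algorithm : String) (outside_px : String) : Decidable (Pre_enhance_pixel_py image i j algorithm outside_px) := by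
  unfold Pre_enhance_pixel_py; infer_instance

def pvWitness_enhance_pixel_py : List String × Int × Int × String × String :=
  (["#.", ".."], 0, 0, ".................", ".")

def Spec_enhance_pixel_py (image : List String) (i : Int) (j : Int) (algorithm : String) (outside_px : String) (out : String) : Prop := out = enhance_pixel_py_alt image i j algorithm outside_px
instance (image : List String) (i : Int) (j : Int) (algorithm : String) (outside_px : String) (out : String) : Decidable (Spec_enhance_pixel_py image i j algorithm outside_px out) := by unfold Spec_enhance_pixel_py; infer_instance

-- ===== CLAIM (what is proved, stated in full; the proofs are below) =====
def Claim_equal_enhance_pixel_py : Prop := ∀ (image : List String) (i : Int) (j : Int) (algorithm : String) (outside_px : String), Dom_enhance_pixel_py image i j algorithm outside_px → Pre_enhance_pixel_py image i j algorithm outside_px → Spec_enhance_pixel_py image i j algorithm outside_px (enhance_pixel_py image i j algorithm outside_px)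

-- ===== LEMMAS AND PROOFS =====
lemma pvRange_m1_2 : PySem.List.pyRange (-1) 2 1 = [-1, 0, 1] := by decide

lemma pvToNat0 : ((-1 : Int) + 1).toNat = 0 := rfl
lemma pvToNat1 : ((0 : Int) + 1).toNat = 1 := rfl
lemma pvToNat2 : ((1 : Int) + 1).toNat = 2 := rfl

-- One window assignment 'if inside: window[n][m] = v' evaluated on a literal 3x3 grid.
lemma pvSet00 (c : Prop) [Decidable c] (r1 r2 : List String) (a1 a2 x v : String) :
    (if c then List.set [[x, a1, a2], r1, r2] 0 ((List.getD [[x, a1, a2], r1, r2] 0 []).set 0 v) else [[x, a1, a2], r1, r2])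
    = [[if c then v else x, a1, a2], r1, r2] := by split <;> rfl
lemma pvSet01 (c : Prop) [Decidable c] (r1 r2 : List String) (a0 a2 x v : String) :
    (if c then List.set [[a0, x, a2], r1, r2] 0 ((List.getD [[a0, x, a2], r1, r2] 0 []).set 1 v) else [[a0, x, a2], r1, r2])
    = [[a0, if c then v else x, a2], r1, r2] := by split <;> rfl
lemma pvSet02 (c : Prop) [Decidable c] (r1 r2 : List String) (a0 a1 x v : String) :
    (if c then List.set [[a0, a1, x], r1, r2] 0 ((List.getD [[a0, a1, x], r1, r2] 0 []).set 2 v) else [[a0, a1, x], r1, r2])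
    = [[a0, a1, if c then v else x], r1, r2] := by split <;> rfl
lemma pvSet10 (c : Prop) [Decidable c] (r0 r2 : List String) (a1 a2 x v : String) :
    (if c then List.set [r0, [x, a1, a2], r2] 1 ((List.getD [r0, [x, a1, a2], r2] 1 []).set 0 v) else [r0, [x, a1, a2], r2])
    = [r0, [if c then v else x, a1, a2], r2] := by split <;> rfl
lemma pvSet11 (c : Prop) [Decidable c] (r0 r2 : List String) (a0 a2 x v : String) :
    (if c then List.set [r0, [a0, x, a2], r2] 1 ((List.getD [r0, [a0, x, a2], r2] 1 []).set 1 v) else [r0, [a0, x, a2], r2])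
    = [r0, [a0, if c then v else x, a2], r2] := by split <;> rfl
lemma pvSet12 (c : Prop) [Decidable c] (r0 r2 : List String) (a0 a1 x v : String) :
    (if c then List.set [r0, [a0, a1, x], r2] 1 ((List.getD [r0, [a0, a1, x], r2] 1 []).set 2 v) else [r0, [a0, a1, x], r2])
    = [r0, [a0, a1, if c then v else x], r2] := by split <;> rfl
lemma pvSet20 (c : Prop) [Decidable c] (r0 r1 : List String) (a1 a2 x v : String) :
    (if c then List.set [r0, r1, [x, a1, a2]] 2 ((List.getD [r0, r1, [x, a1, a2]] 2 []).set 0 v) else [r0, r1, [x, a1, a2]])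
    = [r0, r1, [if c then v else x, a1, a2]] := by split <;> rfl
lemma pvSet21 (c : Prop) [Decidable c] (r0 r1 : List String) (a0 a2 x v : String) :
    (if c then List.set [r0, r1, [a0, x, a2]] 2 ((List.getD [r0, r1, [a0, x, a2]] 2 []).set 1 v) else [r0, r1, [a0, x, a2]])
    = [r0, r1, [a0, if c then v else x, a2]] := by split <;> rfl
lemma pvSet22 (c : Prop) [Decidable c] (r0 r1 : List String) (a0 a1 x v : String) :
    (if c then List.set [r0, r1, [a0, a1, x]] 2 ((List.getD [r0, r1, [a0, a1, x]] 2 []).set 2 v) else [r0, r1, [a0, a1, x]])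
    = [r0, r1, [a0, a1, if c then v else x]] := by split <;> rfl

-- Port A reduces to: look up algorithm at int-base-2 of the joined, replaced 3x3 grid of cell values.
lemma pvA_eval (image : List String) (i j : Int) (algorithm outside_px : String) :
    enhance_pixel_py image i j algorithm outside_px =
    pvLookup algorithm ((PySem.Int.ofStrBase? (PySem.Str.replace (PySem.Str.replace
      (PySem.Str.join "" [
        PySem.Str.join "" [pvG image outside_px (pvW image) (pvH image) (i + -1) (j + -1),
                           pvG image outside_px (pvW image) (pvH image) (i + -1) (j + 0),
                           pvG image outside_px (pvW image) (pvH image) (i + -1) (j + 1)],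
        PySem.Str.join "" [pvG image outside_px (pvW image) (pvH image) (i + 0) (j + -1),
                           pvG image outside_px (pvW image) (pvH image) (i + 0) (j + 0),
                           pvG image outside_px (pvW image) (pvH image) (i + 0) (j + 1)],
        PySem.Str.join "" [pvG image outside_px (pvW image) (pvH image) (i + 1) (j + -1),
                           pvG image outside_px (pvW image) (pvH image) (i + 1) (j + 0),
                           pvG image outside_px (pvW image) (pvH image) (i + 1) (j + 1)]]) "." "0") "#" "1") 2).getD 0) := by
  unfold enhance_pixel_py pvG
  simp only [pvRange_m1_2, List.foldl_cons, List.foldl_nil, List.replicate, pvToNat0, pvToNat1,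
    pvToNat2, pvSet00, pvSet01, pvSet02, pvSet10, pvSet11, pvSet12, pvSet20, pvSet21, pvSet22]
  rfl

-- Port B reduces to: look up algorithm at the weighted sum of cell bits.
lemma pvB_eval (image : List String) (i j : Int) (algorithm outside_px : String) :
    enhance_pixel_py_alt image i j algorithm outside_px =
    pvLookup algorithm (
      256 * pvB (pvG image outside_px (pvW image) (pvH image) (i + -1) (j + -1)) +
      128 * pvB (pvG image outside_px (pvW image) (pvH image) (i + -1) (j + 0)) +
       64 * pvB (pvG image outside_px (pvW image) (pvH image) (i + -1) (j + 1)) +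
       32 * pvB (pvG image outside_px (pvW image) (pvH image) (i + 0) (j + -1)) +
       16 * pvB (pvG image outside_px (pvW image) (pvH image) (i + 0) (j + 0)) +
        8 * pvB (pvG image outside_px (pvW image) (pvH image) (i + 0) (j + 1)) +
        4 * pvB (pvG image outside_px (pvW image) (pvH image) (i + 1) (j + -1)) +
        2 * pvB (pvG image outside_px (pvW image) (pvH image) (i + 1) (j + 0)) +
            pvB (pvG image outside_px (pvW image) (pvH image) (i + 1) (j + 1))) := by
  unfold enhance_pixel_py_alt
  simp only [pvRange_m1_2, List.foldl_cons, List.foldl_nil]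
  have hb : ∀ dx dy : Int,
      (if (if (0 ≤ dx ∧ dx < pvW image) ∧ (0 ≤ dy ∧ dy < pvH image)
            then pvPix image outside_px dx dy else outside_px) = "#" then (1 : Int) else 0)
      = pvB (pvG image outside_px (pvW image) (pvH image) dx dy) := by
    intro dx dy
    rfl
  simp only [hb]
  congr 1
  ring

-- int(..., 2) of the replaced, joined 3x3 grid of '.'/'#' cells equals the weighted bit sum;
-- checked for all 512 combinations at once.
set_option maxHeartbeats 4000000 in
lemma pvKey : ∀ c0 ∈ ([".","#"] : List String), ∀ c1 ∈ ([".","#"] : List String),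
    ∀ c2 ∈ ([".","#"] : List String), ∀ c3 ∈ ([".","#"] : List String),
    ∀ c4 ∈ ([".","#"] : List String), ∀ c5 ∈ ([".","#"] : List String),
    ∀ c6 ∈ ([".","#"] : List String), ∀ c7 ∈ ([".","#"] : List String),
    ∀ c8 ∈ ([".","#"] : List String),
    (PySem.Int.ofStrBase? (PySem.Str.replace (PySem.Str.replace
      (PySem.Str.join "" [PySem.Str.join "" [c0, c1, c2],
                          PySem.Str.join "" [c3, c4, c5],
                          PySem.Str.join "" [c6, c7, c8]]) "." "0") "#" "1") 2).getD 0
    = 256 * pvB c0 + 128 * pvB c1 + 64 * pvB c2 + 32 * pvB c3 + 16 * pvB c4 +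
        8 * pvB c5 + 4 * pvB c6 + 2 * pvB c7 + pvB c8 := by decide

lemma pvMem (s : String) (h : s = "." ∨ s = "#") : s ∈ ([".","#"] : List String) := by
  rcases h with rfl | rfl <;> simp

-- Normalisation: a '0' cell behaves exactly like '.' in both programs (zero bit), so the three-value
-- cell alphabet reduces to the two-value one via pvNorm.
def pvNorm (s : String) : String := if s = "0" then "." else s
def pvF1 (c : Char) : Char := if c = '.' then '0' else c
def pvF2 (c : Char) : Char := if c = '#' then '1' else c

-- Chars.replace with a single-character pattern and replacement is a character map.
lemma pvGoMap (o n : Char) : ∀ (l : List Char) (fuel : Nat) (acc : List Char), l.length ≤ fuel →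
    PySem.Chars.replace.go [o] [n] fuel l acc
    = acc.reverse ++ l.map (fun c => if c = o then n else c) := by
  intro l
  induction l with
  | nil =>
    intro fuel acc h
    cases fuel <;> simp [PySem.Chars.replace.go]
  | cons c t ih =>
    intro fuel acc h
    cases fuel with
    | zero => simp at h
    | succ m =>
      rw [PySem.Chars.replace.go]
      by_cases hc : c = o
      · subst hc
        simp [List.isPrefixOf, ih m (n :: acc) (by simpa using h)]
      · simp [List.isPrefixOf, show (o = c) ↔ False from ⟨fun h' => hc h'.symm, False.elim⟩,
          ih m (c :: acc) (by simpa using h)]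
        exact fun h' => absurd h' hc

lemma pvRepMap (o n : Char) (l : List Char) :
    PySem.Chars.replace l [o] [n] = l.map (fun c => if c = o then n else c) := by
  unfold PySem.Chars.replace
  simp [pvGoMap o n l l.length [] le_rfl]

-- A's binary string, cell by cell at the character level.
lemma pvStr (c0 c1 c2 c3 c4 c5 c6 c7 c8 : String) :
    PySem.Str.replace (PySem.Str.replace
      (PySem.Str.join "" [PySem.Str.join "" [c0, c1, c2],
                          PySem.Str.join "" [c3, c4, c5],
                          PySem.Str.join "" [c6, c7, c8]]) "." "0") "#" "1"
    = String.ofList ((c0.toList.map pvF1).map pvF2 ++ (c1.toList.map pvF1).map pvF2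
        ++ (c2.toList.map pvF1).map pvF2 ++ (c3.toList.map pvF1).map pvF2
        ++ (c4.toList.map pvF1).map pvF2 ++ (c5.toList.map pvF1).map pvF2
        ++ (c6.toList.map pvF1).map pvF2 ++ (c7.toList.map pvF1).map pvF2
        ++ (c8.toList.map pvF1).map pvF2) := by
  simp [PySem.Str.replace, PySem.Str.toList_join, PySem.Chars.join, List.intercalate, pvRepMap,
    List.map_append]
  rfl

lemma pvCellFacts (s : String) (h : s = "." ∨ s = "#" ∨ s = "0") :
    (s.toList.map pvF1).map pvF2 = ((pvNorm s).toList.map pvF1).map pvF2 ∧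
    pvB s = pvB (pvNorm s) ∧ (pvNorm s = "." ∨ pvNorm s = "#") := by
  rcases h with rfl | rfl | rfl <;> exact ⟨rfl, rfl, by simp [pvNorm]⟩

lemma pvKey3 (c0 c1 c2 c3 c4 c5 c6 c7 c8 : String)
    (h0 : c0 = "." ∨ c0 = "#" ∨ c0 = "0") (h1 : c1 = "." ∨ c1 = "#" ∨ c1 = "0")
    (h2 : c2 = "." ∨ c2 = "#" ∨ c2 = "0") (h3 : c3 = "." ∨ c3 = "#" ∨ c3 = "0")
    (h4 : c4 = "." ∨ c4 = "#" ∨ c4 = "0") (h5 : c5 = "." ∨ c5 = "#" ∨ c5 = "0")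
    (h6 : c6 = "." ∨ c6 = "#" ∨ c6 = "0") (h7 : c7 = "." ∨ c7 = "#" ∨ c7 = "0")
    (h8 : c8 = "." ∨ c8 = "#" ∨ c8 = "0") :
    (PySem.Int.ofStrBase? (PySem.Str.replace (PySem.Str.replace
      (PySem.Str.join "" [PySem.Str.join "" [c0, c1, c2],
                          PySem.Str.join "" [c3, c4, c5],
                          PySem.Str.join "" [c6, c7, c8]]) "." "0") "#" "1") 2).getD 0
    = 256 * pvB c0 + 128 * pvB c1 + 64 * pvB c2 + 32 * pvB c3 + 16 * pvB c4 +
        8 * pvB c5 + 4 * pvB c6 + 2 * pvB c7 + pvB c8 := by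
  rw [pvStr, (pvCellFacts c0 h0).1, (pvCellFacts c1 h1).1, (pvCellFacts c2 h2).1,
    (pvCellFacts c3 h3).1, (pvCellFacts c4 h4).1, (pvCellFacts c5 h5).1,
    (pvCellFacts c6 h6).1, (pvCellFacts c7 h7).1, (pvCellFacts c8 h8).1, ← pvStr,
    (pvCellFacts c0 h0).2.1, (pvCellFacts c1 h1).2.1, (pvCellFacts c2 h2).2.1,
    (pvCellFacts c3 h3).2.1, (pvCellFacts c4 h4).2.1, (pvCellFacts c5 h5).2.1,
    (pvCellFacts c6 h6).2.1, (pvCellFacts c7 h7).2.1, (pvCellFacts c8 h8).2.1]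
  exact pvKey _ (pvMem _ (pvCellFacts c0 h0).2.2) _ (pvMem _ (pvCellFacts c1 h1).2.2)
    _ (pvMem _ (pvCellFacts c2 h2).2.2) _ (pvMem _ (pvCellFacts c3 h3).2.2)
    _ (pvMem _ (pvCellFacts c4 h4).2.2) _ (pvMem _ (pvCellFacts c5 h5).2.2)
    _ (pvMem _ (pvCellFacts c6 h6).2.2) _ (pvMem _ (pvCellFacts c7 h7).2.2)
    _ (pvMem _ (pvCellFacts c8 h8).2.2)

-- ===== VERDICT (by name: the statement is the Claim_ definition above) =====
theorem enhance_pixel_py_spec : Claim_equal_enhance_pixel_py := by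
  intro image i j algorithm outside_px _ hpre
  unfold Spec_enhance_pixel_py
  obtain ⟨-, hok, -⟩ := hpre
  simp only [pvOk, Bool.and_eq_true, Bool.or_eq_true, beq_iff_eq] at hok
  obtain ⟨⟨⟨⟨⟨⟨⟨⟨⟨-, h0⟩, -, h1⟩, -, h2⟩, -, h3⟩, -, h4⟩, -, h5⟩, -, h6⟩, -, h7⟩, -, h8⟩ := hok
  rw [pvA_eval, pvB_eval]
  exact congrArg (pvLookup algorithm)
    (pvKey3 _ _ _ _ _ _ _ _ _ (or_assoc.mp h0) (or_assoc.mp h1) (or_assoc.mp h2) (or_assoc.mp h3)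
      (or_assoc.mp h4) (or_assoc.mp h5) (or_assoc.mp h6) (or_assoc.mp h7) (or_assoc.mp h8))
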